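-- pv_equiv track=rewrite | github.com/Harsh-2002/SSH | src/ssh/tools/voip.py | _extract_sip_uri
-- ===== SOURCE A (Python) =====
-- def _extract_sip_uri(value: str | None) -> str | None:
--     if not value:
--         return None
--     lower = value.lower()
--     idx = lower.find("sip:")
--     if idx == -1:
--         idx = lower.find("sips:")
--         if idx == -1:
--             return None
--     end = len(value)
--     for delim in (">", ";", " ", "\t", "\r", "\n"):
--         pos = value.find(delim, idx)
--         if pos != -1 and pos < end:
--             end = pos
--     return value[idx:end]
-- ===== SOURCE B (Python) =====
-- _DELIMS = {">", ";", " ", "\t", "\r", "\n"}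
--
--
-- def _extract_sip_uri(value):
--     if not value:
--         return None
--     lower = value.lower()
--     idx = lower.find("sip:")
--     if idx == -1:
--         idx = lower.find("sips:")
--         if idx == -1:
--             return None
--     end = idx
--     n = len(value)
--     while end < n and value[end] not in _DELIMS:
--         end += 1
--     return value[idx:end]
-- ===== Notes on version B (the rewrite author's own statement) =====
-- stated objective: alternative
-- what changed: Replaced the six whole-string find() scans and running minimum over delimiter positions by a single forward character scan from idx that halts at the first delimiter.
import Mathlib
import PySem

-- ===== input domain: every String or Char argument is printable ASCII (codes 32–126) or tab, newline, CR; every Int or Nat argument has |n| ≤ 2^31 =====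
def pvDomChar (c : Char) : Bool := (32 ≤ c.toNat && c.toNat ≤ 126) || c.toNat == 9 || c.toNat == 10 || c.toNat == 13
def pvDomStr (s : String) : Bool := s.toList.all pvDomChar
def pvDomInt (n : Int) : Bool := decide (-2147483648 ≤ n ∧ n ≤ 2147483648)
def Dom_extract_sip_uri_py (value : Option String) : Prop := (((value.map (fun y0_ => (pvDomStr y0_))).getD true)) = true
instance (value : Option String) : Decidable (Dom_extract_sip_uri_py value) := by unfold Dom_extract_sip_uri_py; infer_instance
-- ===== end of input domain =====

-- B replaces A's six whole-string find() scans (running minimum over delimiter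
-- positions) by a single forward character scan halting at the first delimiter.


-- ===== PORT A =====
def pvDelimsA : List String := [">", ";", " ", "\t", "\r", "\n"]

def pvStepA (v : String) (idx : Int) (e : Int) (delim : String) : Int :=
  let pos := PySem.Str.findFrom v delim idx
  if pos ≠ -1 ∧ pos < e then pos else e

def extract_sip_uri_py (value : Option String) : Option String :=
  match value with
  | none => none
  | some v =>
    if PySem.Str.len v = 0 then none else
      let lw := PySem.Str.lower v
      let idx0 := PySem.Str.find lw "sip:"
      let idx? : Option Int :=
        if idx0 = -1 then
          let idx1 := PySem.Str.find lw "sips:"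
          if idx1 = -1 then none else some idx1
        else some idx0
      match idx? with
      | none => none
      | some idx =>
        let endA := pvDelimsA.foldl (pvStepA v idx) (PySem.Str.len v)
        some (PySem.Str.slice v (some idx) (some endA))

-- ===== PORT B =====
def pvDelimsB : List Char := ['>', ';', ' ', '\t', '\r', '\n']

-- the while-loop of Source B: count of characters scanned before the first delimiter
def pvScanLen : List Char → Nat
  | [] => 0
  | c :: rest => if c ∈ pvDelimsB then 0 else pvScanLen rest + 1

def extract_sip_uri_py_alt (value : Option String) : Option String :=
  match value with
  | none => none
  | some v =>
    if PySem.Str.len v = 0 then none else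
      let lw := PySem.Str.lower v
      let idx0 := PySem.Str.find lw "sip:"
      let idx := if idx0 = -1 then PySem.Str.find lw "sips:" else idx0
      if idx = -1 then none
      else
        let endB : Int := idx + (pvScanLen (v.toList.drop idx.toNat) : Int)
        some (PySem.Str.slice v (some idx) (some endB))

-- ===== PRECONDITION & SPEC =====
def Spec_extract_sip_uri_py (value : Option String) (out : Option String) : Prop := out = extract_sip_uri_py_alt value
instance (value : Option String) (out : Option String) : Decidable (Spec_extract_sip_uri_py value out) := by unfold Spec_extract_sip_uri_py; infer_instance

-- ===== CLAIM (what is proved, stated in full; the proofs are below) =====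
def Claim_equal_extract_sip_uri_py : Prop := ∀ (value : Option String), Dom_extract_sip_uri_py value → Spec_extract_sip_uri_py value (extract_sip_uri_py value)

-- ===== LEMMAS AND PROOFS =====

lemma singleton_prefix_iff (c : Char) (t : List Char) : [c] <+: t ↔ t.head? = some c := by
  cases t with
  | nil => simp
  | cons x xs => simp [List.cons_prefix_iff]

lemma pvScanLen_le (l : List Char) : pvScanLen l ≤ l.length := by
  induction l with
  | nil => simp [pvScanLen]
  | cons c rest ih =>
    simp only [pvScanLen, List.length_cons]
    split <;> omega

lemma pvScanLen_before (l : List Char) (i : Nat) (hi : i < pvScanLen l) (c : Char)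
    (hc : l[i]? = some c) : c ∉ pvDelimsB := by
  induction l generalizing i with
  | nil => simp [pvScanLen] at hi
  | cons x rest ih =>
    by_cases hx : x ∈ pvDelimsB
    · simp [pvScanLen, hx] at hi
    · cases i with
      | zero => simp_all
      | succ n =>
        simp only [pvScanLen, hx, if_false] at hi
        exact ih n (by omega) (by simpa using hc)

lemma pvScanLen_at (l : List Char) (h : pvScanLen l < l.length) :
    ∃ c, l[pvScanLen l]? = some c ∧ c ∈ pvDelimsB := by
  induction l with
  | nil => simp at h
  | cons x rest ih =>
    by_cases hx : x ∈ pvDelimsB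
    · exact ⟨x, by simp [pvScanLen, hx], hx⟩
    · simp only [pvScanLen, hx, if_false] at h ⊢
      obtain ⟨c, hc, hcD⟩ := ih (by simpa using Nat.lt_of_succ_lt_succ h)
      exact ⟨c, by simpa using hc, hcD⟩

-- first occurrence of a delimiter char at index ≥ k is not before k + pvScanLen
lemma find_ge (cs : List Char) (k : Nat) (hk : k ≤ cs.length) (c : Char) (hc : c ∈ pvDelimsB) :
    PySem.Chars.findFrom cs [c] (k : Int) = -1 ∨
      ((k + pvScanLen (cs.drop k) : Nat) : Int) ≤ PySem.Chars.findFrom cs [c] (k : Int) := by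
  by_cases h : PySem.Chars.findFrom cs [c] (k : Int) = -1
  · exact Or.inl h
  · right
    obtain ⟨hkle, hpre, _⟩ := PySem.Chars.findFrom_natCast_spec cs [c] k hk h
    set P := PySem.Chars.findFrom cs [c] (k : Int) with hP
    by_contra hlt
    rw [not_le] at hlt
    have h0 : 0 ≤ P := le_trans (by positivity) hkle
    have hkn : k ≤ P.toNat := by omega
    have hPj : P.toNat < k + pvScanLen (cs.drop k) := by omega
    have hhd : (cs.drop P.toNat).head? = some c := (singleton_prefix_iff c _).mp hpre
    rw [List.head?_drop] at hhd
    have hidx : (cs.drop k)[P.toNat - k]? = some c := by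
      rw [List.getElem?_drop]
      rwa [Nat.add_sub_cancel' hkn]
    exact pvScanLen_before _ (P.toNat - k) (by omega) c hidx hc

lemma find_hit (cs : List Char) (k : Nat) (hk : k ≤ cs.length) (c : Char) (hc : c ∈ pvDelimsB)
    (_hj : k + pvScanLen (cs.drop k) < cs.length)
    (hat : cs[k + pvScanLen (cs.drop k)]? = some c) :
    PySem.Chars.findFrom cs [c] (k : Int) = ((k + pvScanLen (cs.drop k) : Nat) : Int) := by
  set j := k + pvScanLen (cs.drop k) with hjdef
  have hkj : k ≤ j := by omega
  have hpj : [c] <+: cs.drop j := by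
    rw [singleton_prefix_iff, List.head?_drop]; exact hat
  have hinf : [c] <:+: cs.drop k := by
    have hdd : (cs.drop k).drop (j - k) = cs.drop j := by
      rw [List.drop_drop]; congr 1; omega
    obtain ⟨t, ht⟩ := hpj
    refine ⟨(cs.drop k).take (j - k), t, ?_⟩
    conv_rhs => rw [← List.take_append_drop (j - k) (cs.drop k)]
    rw [hdd, ← ht, List.append_assoc]
  have hne : PySem.Chars.findFrom cs [c] (k : Int) ≠ -1 := by
    intro hcon
    exact (PySem.Chars.findFrom_natCast_eq_neg_one_iff cs [c] k hk).mp hcon hinf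
  obtain ⟨hkle, _, hmin⟩ := PySem.Chars.findFrom_natCast_spec cs [c] k hk hne
  set P := PySem.Chars.findFrom cs [c] (k : Int) with hP
  have h0 : 0 ≤ P := le_trans (by positivity) hkle
  have hle : P ≤ (j : Int) := by
    by_contra hgt
    rw [not_le] at hgt
    exact hmin j hkj (by omega) hpj
  have hge := find_ge cs k hk c hc
  rw [← hjdef] at hge
  rcases hge with h | h
  · exact absurd h hne
  · omega

lemma foldl_step_le (v : String) (idx : Int) (ds : List String) (e : Int) :
    ds.foldl (pvStepA v idx) e ≤ e := by
  induction ds generalizing e with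
  | nil => simp
  | cons d rest ih =>
    refine le_trans (ih _) ?_
    simp only [pvStepA]
    split
    · rename_i h; exact le_of_lt h.2
    · exact le_rfl

lemma foldl_step_ge (v : String) (idx : Int) (j : Int) (ds : List String) :
    ∀ e : Int, (∀ d ∈ ds, PySem.Str.findFrom v d idx = -1 ∨ j ≤ PySem.Str.findFrom v d idx) →
      j ≤ e → j ≤ ds.foldl (pvStepA v idx) e := by
  induction ds with
  | nil => intro e _ he; simpa
  | cons d rest ih =>
    intro e hall he
    refine ih _ (fun d' hd' => hall d' (List.mem_cons_of_mem _ hd')) ?_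
    simp only [pvStepA]
    split
    · rename_i h
      rcases hall d (List.mem_cons_self ..) with h' | h'
      · exact absurd h' h.1
      · exact h'
    · exact he

lemma foldl_step_hit (v : String) (idx : Int) (j : Int) (hj : 0 ≤ j) (ds : List String)
    (d : String) (hd : d ∈ ds) (hfd : PySem.Str.findFrom v d idx = j) (e : Int) :
    ds.foldl (pvStepA v idx) e ≤ j := by
  induction ds generalizing e with
  | nil => simp at hd
  | cons d' rest ih =>
    rcases List.mem_cons.mp hd with rfl | hmem
    · refine le_trans (foldl_step_le v idx rest _) ?_
      simp only [pvStepA, hfd]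
      split
      · exact le_rfl
      · rename_i h
        rcases not_and_or.mp h with h' | h'
        · omega
        · omega
    · exact ih hmem _

lemma pvLower_length (l : List Char) : (PySem.Chars.lower l).length = l.length := by
  simp [PySem.Chars.lower]

lemma pvDelimsA_chars : ∀ d ∈ pvDelimsA, ∃ c, d.toList = [c] ∧ c ∈ pvDelimsB := by
  intro d hd
  fin_cases hd
  · exact ⟨'>', rfl, by decide⟩
  · exact ⟨';', rfl, by decide⟩
  · exact ⟨' ', rfl, by decide⟩
  · exact ⟨'\t', rfl, by decide⟩
  · exact ⟨'\r', rfl, by decide⟩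
  · exact ⟨'\n', rfl, by decide⟩

lemma pvDelimsB_strs : ∀ c ∈ pvDelimsB, ∃ d, d ∈ pvDelimsA ∧ d.toList = [c] := by
  intro c hc
  fin_cases hc
  · exact ⟨">", by decide, rfl⟩
  · exact ⟨";", by decide, rfl⟩
  · exact ⟨" ", by decide, rfl⟩
  · exact ⟨"\t", by decide, rfl⟩
  · exact ⟨"\r", by decide, rfl⟩
  · exact ⟨"\n", by decide, rfl⟩

-- A's fold over the six delimiters equals idx plus B's scan length
lemma endA_eq (v : String) (idx : Int) (h0 : 0 ≤ idx) (hlen : idx ≤ (v.toList.length : Int)) :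
    pvDelimsA.foldl (pvStepA v idx) (PySem.Str.len v) =
      idx + (pvScanLen (v.toList.drop idx.toNat) : Int) := by
  set cs := v.toList with hcs
  set k := idx.toNat with hkdef
  have hidx : idx = (k : Int) := by omega
  have hk : k ≤ cs.length := by omega
  have hvl : PySem.Str.len v = (cs.length : Int) := by rw [PySem.Str.len_eq, hcs]
  set j : Nat := k + pvScanLen (cs.drop k) with hjdef
  have hjn : j ≤ cs.length := by
    have := pvScanLen_le (cs.drop k)
    simp only [List.length_drop] at this
    omega
  have hall : ∀ d ∈ pvDelimsA,
      PySem.Str.findFrom v d idx = -1 ∨ (j : Int) ≤ PySem.Str.findFrom v d idx := by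
    intro d hd
    obtain ⟨c, hcl, hcD⟩ := pvDelimsA_chars d hd
    rw [PySem.Str.findFrom_eq, hcl, hidx, ← hcs]
    exact find_ge cs k hk c hcD
  have hge : (j : Int) ≤ pvDelimsA.foldl (pvStepA v idx) (PySem.Str.len v) := by
    refine foldl_step_ge v idx _ _ _ hall ?_
    rw [hvl]
    exact_mod_cast hjn
  have hle : pvDelimsA.foldl (pvStepA v idx) (PySem.Str.len v) ≤ (j : Int) := by
    by_cases hcase : j < cs.length
    · have hsc : pvScanLen (cs.drop k) < (cs.drop k).length := by
        simp only [List.length_drop]; omega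
      obtain ⟨c, hc?, hcD⟩ := pvScanLen_at (cs.drop k) hsc
      have hat : cs[j]? = some c := by
        rw [List.getElem?_drop] at hc?; exact hc?
      obtain ⟨d, hdA, hdl⟩ := pvDelimsB_strs c hcD
      refine foldl_step_hit v idx (j : Int) (Int.natCast_nonneg j) _ d hdA ?_ _
      rw [PySem.Str.findFrom_eq, hdl, hidx, ← hcs]
      exact find_hit cs k hk c hcD hcase hat
    · have hje : j = cs.length := by omega
      refine le_trans (foldl_step_le v idx _ _) ?_
      rw [hvl, hje]
  have hfin := le_antisymm hle hge
  rw [hfin, hidx]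
  omega

lemma find_bounds (v sub : String)
    (h : PySem.Str.find (PySem.Str.lower v) sub ≠ -1) :
    0 ≤ PySem.Str.find (PySem.Str.lower v) sub ∧
      PySem.Str.find (PySem.Str.lower v) sub ≤ (v.toList.length : Int) := by
  rw [PySem.Str.find_eq, PySem.Str.toList_lower] at h ⊢
  have h1 := PySem.Chars.neg_one_le_find (PySem.Chars.lower v.toList) sub.toList
  have h2 := PySem.Chars.find_le_length (PySem.Chars.lower v.toList) sub.toList
  rw [pvLower_length] at h2
  omega

-- ===== VERDICT (by name: the statement is the Claim_ definition above) =====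
theorem extract_sip_uri_py_spec : Claim_equal_extract_sip_uri_py := by
  unfold Claim_equal_extract_sip_uri_py
  intro value _
  unfold Spec_extract_sip_uri_py
  match value with
  | none => rfl
  | some v =>
    simp only [extract_sip_uri_py, extract_sip_uri_py_alt]
    by_cases hlen : PySem.Str.len v = 0
    · simp only [if_pos hlen]
    · simp only [if_neg hlen]
      by_cases h0 : PySem.Str.find (PySem.Str.lower v) "sip:" = -1
      · simp only [if_pos h0]
        by_cases h1 : PySem.Str.find (PySem.Str.lower v) "sips:" = -1
        · simp only [if_pos h1]
        · simp only [if_neg h1]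
          obtain ⟨ha, hb⟩ := find_bounds v "sips:" h1
          rw [endA_eq v _ ha hb]
      · simp only [if_neg h0]
        obtain ⟨ha, hb⟩ := find_bounds v "sip:" h0
        rw [endA_eq v _ ha hb]
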